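-- pv_equiv track=rewrite | github.com/yeltayzhastay/gen2name | name_generator.py | bigram_transform
-- ===== SOURCE A (Python) =====
-- def bigram_transform(names):
--     bag_of_bigrams = []
--     for name in names:
--         bag_of_bigrams.append(f'^{name[0]}')
--
--         for i in range(len(name)-1):
--             bag_of_bigrams.append(f'{name[i]}{name[i+1]}')
--
--         bag_of_bigrams.append(f'{name[-1]}$')
--
--     return bag_of_bigrams
-- ===== SOURCE B (Python) =====
-- def bigram_transform(names):
--     out = []
--     for name in names:
--         prev = '^'
--         for ch in name:
--             out.append(prev + ch)
--             prev = ch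
--         out.append(prev + '$')
--     return out
-- ===== Notes on version B (the rewrite author's own statement) =====
-- stated objective: alternative
-- what changed: B is a streaming scan that carries the previous character as loop state, emitting prev+ch per character and finally prev+'$' (prev starts '^'); A instead indexes the string three ways (name[0], range-indexed name[i]/name[i+1], name[-1]) with boundary-special-cased appends — B avoids per-character index arithmetic and subscripting.
-- outside the precondition, e.g. on bigram_transform(['']): A raises IndexError, B returns ['^$']
import Mathlib
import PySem

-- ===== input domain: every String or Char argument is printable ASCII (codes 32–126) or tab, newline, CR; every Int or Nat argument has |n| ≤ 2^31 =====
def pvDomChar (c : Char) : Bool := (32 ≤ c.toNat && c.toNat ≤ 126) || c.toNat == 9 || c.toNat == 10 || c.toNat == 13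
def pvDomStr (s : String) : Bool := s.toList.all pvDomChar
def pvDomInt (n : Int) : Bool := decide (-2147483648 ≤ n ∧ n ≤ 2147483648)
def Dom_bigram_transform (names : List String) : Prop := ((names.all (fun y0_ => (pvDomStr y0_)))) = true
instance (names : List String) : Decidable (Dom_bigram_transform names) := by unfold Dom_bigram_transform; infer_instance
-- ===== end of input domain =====

-- B is a streaming scan carrying the previous character as state (emit prev+ch then shift),
-- replacing A's triple indexing (name[0], name[i]/name[i+1], name[-1]); objective: alternative.

-- ===== PORT A =====
def bigram_transform (names : List String) : List String :=
  names.foldl (fun bag name =>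
    let cs := name.toList
    let bag := bag ++ [String.ofList ['^', PySem.List.pyGetD cs 0 ' ']]  -- f'^{name[0]}' (raises on empty name: excluded by Pre_)
    let bag := (PySem.List.pyRange 0 ((cs.length : Int) - 1) 1).foldl
        (fun b i => b ++ [String.ofList [PySem.List.pyGetD cs i ' ', PySem.List.pyGetD cs (i + 1) ' ']]) bag
    bag ++ [String.ofList [PySem.List.pyGetD cs (-1) ' ', '$']]) []

-- ===== PORT B =====
def bigram_transform_alt (names : List String) : List String :=
  names.foldl (fun out name =>
    let st := name.toList.foldl
      (fun (s : List String × Char) ch => (s.1 ++ [String.ofList [s.2, ch]], ch)) (out, '^')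
    st.1 ++ [String.ofList [st.2, '$']]) []

-- ===== PRECONDITION & SPEC =====
-- Pre_ excludes lists containing an empty string: there A raises IndexError at name[0].
def Pre_bigram_transform (names : List String) : Prop := ∀ s ∈ names, s ≠ ""
instance (names : List String) : Decidable (Pre_bigram_transform names) := by
  unfold Pre_bigram_transform; infer_instance
def pvWitness_bigram_transform : List String := ["anna", "bo"]

def Spec_bigram_transform (names : List String) (out : List String) : Prop := out = bigram_transform_alt names
instance (names : List String) (out : List String) : Decidable (Spec_bigram_transform names out) := by unfold Spec_bigram_transform; infer_instance

-- ===== CLAIM =====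
def Claim_equal_bigram_transform : Prop := ∀ (names : List String), Dom_bigram_transform names → Pre_bigram_transform names → Spec_bigram_transform names (bigram_transform names)

-- ===== LEMMAS AND PROOFS =====

/-- Consecutive character pairs of a list, as 2-char strings. -/
def pairsSpec : List Char → List String
  | a :: b :: t => String.ofList [a, b] :: pairsSpec (b :: t)
  | _ => []

/-- Pairs of `p :: cs`: what B's carried-state scan emits. -/
def pairsWith : Char → List Char → List String
  | _, [] => []
  | p, c :: t => String.ofList [p, c] :: pairsWith c t

lemma pairsWith_eq_pairsSpec (p : Char) (cs : List Char) :
    pairsWith p cs = pairsSpec (p :: cs) := by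
  induction cs generalizing p with
  | nil => rfl
  | cons c t ih => simp [pairsWith, pairsSpec, ih]

lemma range_map_eq_pairsSpec (cs : List Char) :
    (List.range (cs.length - 1)).map
      (fun k => String.ofList [cs.getD k ' ', cs.getD (k + 1) ' ']) = pairsSpec cs := by
  induction cs with
  | nil => simp [pairsSpec]
  | cons a t ih =>
      cases t with
      | nil => simp [pairsSpec]
      | cons b u =>
          simp only [List.length_cons, Nat.add_sub_cancel, List.range_succ_eq_map,
            List.map_cons, List.map_map, pairsSpec]
          refine congrArg₂ _ rfl ?_
          rw [← ih]
          simp only [List.length_cons, Nat.add_sub_cancel]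
          exact List.map_congr_left fun k _ => by simp [Function.comp]

lemma foldA_eq (cs : List Char) (bag : List String) :
    (PySem.List.pyRange 0 ((cs.length : Int) - 1) 1).foldl
        (fun b i => b ++ [String.ofList [PySem.List.pyGetD cs i ' ', PySem.List.pyGetD cs (i + 1) ' ']]) bag
      = bag ++ pairsSpec cs := by
  rw [PySem.List.foldl_append_singleton_eq_map, PySem.List.pyRange_one]
  have h1 : ((cs.length : Int) - 1 - 0).toNat = cs.length - 1 := by omega
  rw [h1, List.map_map, ← range_map_eq_pairsSpec cs]
  refine congrArg _ (List.map_congr_left fun k _ => ?_)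
  have h0 : (0 : Int) + (k : Int) = ((k : Nat) : Int) := by omega
  have h2 : ((k : Nat) : Int) + 1 = (((k + 1 : Nat)) : Int) := by omega
  simp only [Function.comp, h0, h2, PySem.List.pyGetD_natCast]

lemma foldB_eq (cs : List Char) (out : List String) (p : Char) :
    cs.foldl (fun (s : List String × Char) ch => (s.1 ++ [String.ofList [s.2, ch]], ch)) (out, p)
      = (out ++ pairsWith p cs, cs.getLastD p) := by
  induction cs generalizing out p with
  | nil => simp [pairsWith]
  | cons c t ih =>
      simp only [List.foldl_cons, ih, pairsWith, List.append_assoc, List.singleton_append,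
        Prod.mk.injEq, true_and]
      cases t with
      | nil => exact rfl
      | cons b u => conv_rhs => rw [List.getLastD_cons]

lemma getLastD_eq_getLast_char (cs : List Char) (h : cs ≠ []) (d : Char) :
    cs.getLastD d = cs.getLast h := by
  induction cs generalizing d with
  | nil => exact absurd rfl h
  | cons c t ih =>
      cases t with
      | nil => rfl
      | cons b u => simpa [List.getLast_cons] using ih (by simp) c

lemma per_name (name : String) (h : name ≠ "") (bag : List String) :
    ((PySem.List.pyRange 0 ((name.toList.length : Int) - 1) 1).foldl
        (fun b i => b ++ [String.ofList [PySem.List.pyGetD name.toList i ' ', PySem.List.pyGetD name.toList (i + 1) ' ']])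
        (bag ++ [String.ofList ['^', PySem.List.pyGetD name.toList 0 ' ']]))
      ++ [String.ofList [PySem.List.pyGetD name.toList (-1) ' ', '$']]
    = (let st := name.toList.foldl
        (fun (s : List String × Char) ch => (s.1 ++ [String.ofList [s.2, ch]], ch)) (bag, '^')
       st.1 ++ [String.ofList [st.2, '$']]) := by
  have hcs : name.toList ≠ [] := fun hnil => h (String.toList_eq_nil_iff.mp hnil)
  rw [foldA_eq]
  simp only [foldB_eq, pairsWith_eq_pairsSpec]
  match name.toList, hcs with
  | c :: t, _ =>
      rw [PySem.List.pyGetD_zero, PySem.List.pyGetD_neg_one (c :: t) ' ' (by simp),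
        getLastD_eq_getLast_char (c :: t) (by simp) '^']
      cases t <;> simp [pairsSpec]

lemma fold_eq (names : List String) (h : ∀ s ∈ names, s ≠ "") (bag : List String) :
    names.foldl (fun bag name =>
      let cs := name.toList
      let bag := bag ++ [String.ofList ['^', PySem.List.pyGetD cs 0 ' ']]
      let bag := (PySem.List.pyRange 0 ((cs.length : Int) - 1) 1).foldl
          (fun b i => b ++ [String.ofList [PySem.List.pyGetD cs i ' ', PySem.List.pyGetD cs (i + 1) ' ']]) bag
      bag ++ [String.ofList [PySem.List.pyGetD cs (-1) ' ', '$']]) bag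
    = names.foldl (fun out name =>
      let st := name.toList.foldl
        (fun (s : List String × Char) ch => (s.1 ++ [String.ofList [s.2, ch]], ch)) (out, '^')
      st.1 ++ [String.ofList [st.2, '$']]) bag := by
  induction names generalizing bag with
  | nil => rfl
  | cons n t ih =>
      simp only [List.foldl_cons]
      rw [per_name n (h n (by simp)) bag]
      exact ih (fun s hs => h s (by simp [hs])) _

-- ===== VERDICT =====
theorem bigram_transform_spec : Claim_equal_bigram_transform := by
  intro names _ hpre
  unfold Spec_bigram_transform bigram_transform bigram_transform_alt
  exact fold_eq names hpre []
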